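-- pv_equiv track=rewrite | github.com/ParkSeHoo/- | BOJ/even_tomato/asd.py | checktomatoexception
-- ===== SOURCE A (Python) =====
-- directions = [(1, 0), (0, 1), (-1, 0), (0, -1)]  # 상하좌우 이동
--
-- def checktomatoexception(field):
--     """ 익지 못하는 토마토가 있는지 확인 """
--     for i in range(len(field)):
--         for j in range(len(field[0])):
--             if field[i][j] == 0:  # 익지 않은 토마토 찾기
--                 blocked = True
--                 for dx, dy in directions:
--                     nx, ny = i + dx, j + dy
--                     if 0 <= nx < len(field) and 0 <= ny < len(field[0]) and field[nx][ny] != -1: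
--                         blocked = False
--                         break
--                 if blocked:  # 0이 완전히 -1로 둘러싸여 있으면 익힐 수 없음
--                     return False
--     return True
-- ===== SOURCE B (Python) =====
-- def checktomatoexception(field):
--     """ Two-pass rewrite: scatter open-neighbor coordinates into a set, then test every unripe cell. """
--     if not field:
--         return True
--     h, w = len(field), len(field[0])
--     has_open_neighbor = set()
--     for a in range(h):
--         for b in range(w):
--             if field[a][b] != -1:
--                 for p in ((a + 1, b), (a - 1, b), (a, b + 1), (a, b - 1)):
--                     if 0 <= p[0] < h and 0 <= p[1] < w:
--                         has_open_neighbor.add(p)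
--     for i in range(h):
--         for j in range(w):
--             if field[i][j] == 0 and (i, j) not in has_open_neighbor:
--                 return False
--     return True
-- ===== Notes on version B (the rewrite author's own statement) =====
-- stated objective: alternative
-- what changed: Instead of testing each unripe cell's four neighbors with a per-cell direction loop and break, B makes one scatter pass that records into a set every coordinate adjacent to a non-wall cell, then a second pass checks each 0-cell for membership in that set.
-- outside the precondition, e.g. on checktomatoexception([[0, -1], [-1]]): A returns False, B raises IndexError
import Mathlib
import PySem

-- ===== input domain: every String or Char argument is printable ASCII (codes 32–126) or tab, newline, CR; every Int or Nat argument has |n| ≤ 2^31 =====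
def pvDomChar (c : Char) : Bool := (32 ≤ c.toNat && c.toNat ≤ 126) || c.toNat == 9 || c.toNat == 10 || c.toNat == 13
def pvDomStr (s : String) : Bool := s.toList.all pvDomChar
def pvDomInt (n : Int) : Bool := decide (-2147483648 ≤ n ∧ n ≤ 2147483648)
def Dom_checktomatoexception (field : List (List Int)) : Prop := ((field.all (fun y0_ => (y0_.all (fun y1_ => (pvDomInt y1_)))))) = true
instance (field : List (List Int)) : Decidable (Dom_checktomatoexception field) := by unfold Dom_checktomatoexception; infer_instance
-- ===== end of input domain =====

-- ONE-LINE SUMMARY: B replaces A's per-cell direction probe (with break/early return) by a scatter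
-- pass collecting all open-neighbor coordinates into a set followed by a membership pass; alternative
-- decomposition, same asymptotic cost.

-- ===== PORT A =====
-- field[i][j], totalised with defaults; inside Pre_ every access A performs is in range (exact there)
def pyAt (field : List (List Int)) (i j : Int) : Int :=
  PySem.List.pyGetD (PySem.List.pyGetD field i []) j 0

-- len(field[0]); Python evaluates it only for nonempty field — inside Pre_ both agree
def pvW (field : List (List Int)) : Int :=
  ((PySem.List.pyGetD field 0 ([] : List Int)).length : Int)

def pvDirections : List (Int × Int) := [(1, 0), (0, 1), (-1, 0), (0, -1)]

-- the inner 'for dx, dy in directions: … blocked = False; break' loop (nx, ny inlined)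
def aBlocked (field : List (List Int)) (i j : Int) : Bool :=
  pvDirections.foldl
    (fun blocked d =>
      if blocked then
        if 0 ≤ i + d.1 ∧ i + d.1 < (field.length : Int) ∧ 0 ≤ j + d.2 ∧ j + d.2 < pvW field ∧
            pyAt field (i + d.1) (j + d.2) ≠ -1
        then false
        else blocked
      else blocked)
    true

-- the inner 'for j in range(len(field[0]))' loop with its early 'return False'
def aRow (field : List (List Int)) (i : Int) : List Int → Bool
  | [] => true
  | j :: js => if pyAt field i j = 0 ∧ aBlocked field i j then false else aRow field i js

-- the outer 'for i in range(len(field))' loop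
def aRows (field : List (List Int)) : List Int → Bool
  | [] => true
  | i :: is =>
      if aRow field i (PySem.List.pyRange 0 (pvW field) 1) then aRows field is else false

def checktomatoexception (field : List (List Int)) : Bool :=
  aRows field (PySem.List.pyRange 0 (field.length : Int) 1)

-- ===== PORT B =====
def bNeighbors (a b : Int) : List (Int × Int) := [(a + 1, b), (a - 1, b), (a, b + 1), (a, b - 1)]

-- one step of the scatter pass: record the in-bounds neighbors of a non-wall cell
def bAddCell (field : List (List Int)) (h w : Int) (s : PySem.Set (Int × Int)) (a b : Int) :
    PySem.Set (Int × Int) :=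
  if pyAt field a b ≠ -1 then
    (bNeighbors a b).foldl
      (fun s p => if 0 ≤ p.1 ∧ p.1 < h ∧ 0 ≤ p.2 ∧ p.2 < w then PySem.Set.add s p else s) s
  else s

-- the whole scatter pass: has_open_neighbor
def bOpen (field : List (List Int)) (h w : Int) : PySem.Set (Int × Int) :=
  (PySem.List.pyRange 0 h 1).foldl
    (fun s a => (PySem.List.pyRange 0 w 1).foldl (fun s b => bAddCell field h w s a b) s)
    PySem.Set.empty

-- second pass, inner loop with early 'return False'
def bRow (field : List (List Int)) (s : PySem.Set (Int × Int)) (i : Int) : List Int → Bool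
  | [] => true
  | j :: js =>
      if pyAt field i j = 0 ∧ ¬ PySem.Set.contains s (i, j) then false else bRow field s i js

-- second pass, outer loop
def bRows (field : List (List Int)) (s : PySem.Set (Int × Int)) (w : Int) : List Int → Bool
  | [] => true
  | i :: is =>
      if bRow field s i (PySem.List.pyRange 0 w 1) then bRows field s w is else false

def checktomatoexception_alt (field : List (List Int)) : Bool :=
  if field = [] then true
  else
    let h : Int := (field.length : Int)
    let w : Int := ((PySem.List.pyGetD field 0 ([] : List Int)).length : Int)
    bRows field (bOpen field h w) w (PySem.List.pyRange 0 h 1)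

-- ===== PRECONDITION & SPEC =====
-- Pre_ excludes ragged fields with a row shorter than the first row: on those A usually raises
-- IndexError, and the few on which A still returns (an early `return False` fires before the short
-- row is scanned, e.g. [[0,-1],[-1]]) are accidents of A's scan order that B's natural two-pass
-- algorithm raises on as well.
def Pre_checktomatoexception (field : List (List Int)) : Prop :=
  ∀ row ∈ field, (PySem.List.pyGetD field 0 ([] : List Int)).length ≤ row.length
instance (field : List (List Int)) : Decidable (Pre_checktomatoexception field) := by
  unfold Pre_checktomatoexception; infer_instance

def pvWitness_checktomatoexception : List (List Int) := [[0, -1], [1, 2]]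

def Spec_checktomatoexception (field : List (List Int)) (out : Bool) : Prop :=
  out = checktomatoexception_alt field
instance (field : List (List Int)) (out : Bool) : Decidable (Spec_checktomatoexception field out) := by
  unfold Spec_checktomatoexception; infer_instance

-- ===== CLAIM (what is proved, stated in full; the proofs are below) =====
def Claim_equal_checktomatoexception : Prop :=
  ∀ (field : List (List Int)), Dom_checktomatoexception field →
    Pre_checktomatoexception field →
      Spec_checktomatoexception field (checktomatoexception field)

-- ===== LEMMAS AND PROOFS =====

-- A's per-cell condition: some in-bounds neighbor is not a wall
def OpenCell (field : List (List Int)) (h w i j : Int) : Prop :=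
  ∃ p ∈ bNeighbors i j, (0 ≤ p.1 ∧ p.1 < h ∧ 0 ≤ p.2 ∧ p.2 < w) ∧ pyAt field p.1 p.2 ≠ -1

theorem foldl_blocked {α : Type} (Q : α → Prop) [DecidablePred Q] (l : List α) (blocked : Bool) :
    (l.foldl (fun bl d => if bl then (if Q d then false else bl) else bl) blocked) = false ↔
      (blocked = false ∨ ∃ d ∈ l, Q d) := by
  induction l generalizing blocked with
  | nil => simp
  | cons d ds ih =>
      rw [List.foldl_cons, ih]
      cases blocked <;> by_cases h : Q d <;> simp [h] <;> tauto

theorem aBlocked_eq_false_iff (field : List (List Int)) (i j : Int) :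
    aBlocked field i j = false ↔ OpenCell field (field.length : Int) (pvW field) i j := by
  unfold aBlocked
  rw [foldl_blocked (fun d : Int × Int =>
    0 ≤ i + d.1 ∧ i + d.1 < (field.length : Int) ∧ 0 ≤ j + d.2 ∧ j + d.2 < pvW field ∧
      pyAt field (i + d.1) (j + d.2) ≠ -1)]
  simp only [Bool.true_eq_false, false_or]
  constructor
  · rintro ⟨d, hd, h1, h2, h3, h4, h5⟩
    refine ⟨(i + d.1, j + d.2), ?_, ⟨h1, h2, h3, h4⟩, h5⟩
    simp only [pvDirections, List.mem_cons, List.not_mem_nil, or_false] at hd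
    simp only [bNeighbors, List.mem_cons, List.not_mem_nil, or_false, Prod.mk.injEq]
    rcases hd with rfl | rfl | rfl | rfl <;> norm_num <;> omega
  · rintro ⟨p, hp, ⟨h1, h2, h3, h4⟩, h5⟩
    simp only [bNeighbors, List.mem_cons, List.not_mem_nil, or_false] at hp
    rcases hp with rfl | rfl | rfl | rfl
    · exact ⟨(1, 0), by simp [pvDirections], by simpa using h1, by simpa using h2,
        by simpa using h3, by simpa using h4, by simpa [sub_eq_add_neg] using h5⟩
    · exact ⟨(-1, 0), by simp [pvDirections], by simpa [sub_eq_add_neg] using h1,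
        by simpa [sub_eq_add_neg] using h2, by simpa using h3, by simpa using h4,
        by simpa [sub_eq_add_neg] using h5⟩
    · exact ⟨(0, 1), by simp [pvDirections], by simpa using h1, by simpa using h2,
        by simpa using h3, by simpa using h4, by simpa [sub_eq_add_neg] using h5⟩
    · exact ⟨(0, -1), by simp [pvDirections], by simpa using h1, by simpa using h2,
        by simpa [sub_eq_add_neg] using h3, by simpa [sub_eq_add_neg] using h4,
        by simpa [sub_eq_add_neg] using h5⟩

theorem aRow_eq_true_iff (field : List (List Int)) (i : Int) (l : List Int) :
    aRow field i l = true ↔ ∀ j ∈ l, pyAt field i j = 0 → aBlocked field i j = false := by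
  induction l with
  | nil => simp [aRow]
  | cons j js ih =>
      rw [aRow]
      by_cases h0 : pyAt field i j = 0
      · cases hb : aBlocked field i j <;> simp [h0, hb, ih]
      · simp [h0, ih]

theorem aRows_eq_true_iff (field : List (List Int)) (l : List Int) :
    aRows field l = true ↔
      ∀ i ∈ l, aRow field i (PySem.List.pyRange 0 (pvW field) 1) = true := by
  induction l with
  | nil => simp [aRows]
  | cons i is ih =>
      by_cases h : aRow field i (PySem.List.pyRange 0 (pvW field) 1) = true <;>
        simp [aRows, h, ih]

theorem bRow_eq_true_iff (field : List (List Int)) (s : PySem.Set (Int × Int)) (i : Int)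
    (l : List Int) :
    bRow field s i l = true ↔
      ∀ j ∈ l, pyAt field i j = 0 → PySem.Set.contains s (i, j) = true := by
  induction l with
  | nil => simp [bRow]
  | cons j js ih =>
      rw [bRow]
      by_cases h0 : pyAt field i j = 0
      · cases hc : PySem.Set.contains s (i, j)
        · have hm : (i, j) ∉ s := fun h => by simp at hc; exact hc h
          simp [h0, hc, ih, hm]
        · have hm : (i, j) ∈ s := (PySem.Set.contains_iff _ _).mp hc
          simp [h0, hc, ih, hm]
      · simp [h0, ih]

theorem bRows_eq_true_iff (field : List (List Int)) (s : PySem.Set (Int × Int)) (w : Int)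
    (l : List Int) :
    bRows field s w l = true ↔
      ∀ i ∈ l, bRow field s i (PySem.List.pyRange 0 w 1) = true := by
  induction l with
  | nil => simp [bRows]
  | cons i is ih =>
      by_cases h : bRow field s i (PySem.List.pyRange 0 w 1) = true <;> simp [bRows, h, ih]

-- generic membership through a fold of conditional adds
theorem mem_foldl_of_step {α σ : Type} (f : List σ → α → List σ) (P : α → σ → Prop)
    (hf : ∀ s x p, p ∈ f s x ↔ P x p ∨ p ∈ s) (l : List α) (s : List σ) (p : σ) :
    p ∈ l.foldl f s ↔ (∃ x ∈ l, P x p) ∨ p ∈ s := by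
  induction l generalizing s with
  | nil => simp
  | cons x xs ih => rw [List.foldl_cons, ih, hf]; aesop

theorem mem_bAddCell (field : List (List Int)) (h w : Int) (s : PySem.Set (Int × Int))
    (a b : Int) (p : Int × Int) :
    p ∈ bAddCell field h w s a b ↔
      (pyAt field a b ≠ -1 ∧ p ∈ bNeighbors a b ∧ 0 ≤ p.1 ∧ p.1 < h ∧ 0 ≤ p.2 ∧ p.2 < w)
        ∨ p ∈ s := by
  unfold bAddCell
  split_ifs with hv
  · rw [mem_foldl_of_step _ (fun q r => r = q ∧ 0 ≤ q.1 ∧ q.1 < h ∧ 0 ≤ q.2 ∧ q.2 < w)]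
    · constructor
      · rintro (⟨q, hq, rfl, hb⟩ | hs)
        · exact Or.inl ⟨hv, hq, hb⟩
        · exact Or.inr hs
      · rintro (⟨_, hq, hb⟩ | hs)
        · exact Or.inl ⟨p, hq, rfl, hb⟩
        · exact Or.inr hs
    · intro s q r
      split_ifs with hb
      · rw [PySem.Set.mem_add]; aesop
      · aesop
  · aesop

theorem mem_bOpen (field : List (List Int)) (h w : Int) (p : Int × Int) :
    p ∈ bOpen field h w ↔
      ∃ a ∈ PySem.List.pyRange 0 h 1, ∃ b ∈ PySem.List.pyRange 0 w 1,
        pyAt field a b ≠ -1 ∧ p ∈ bNeighbors a b ∧ 0 ≤ p.1 ∧ p.1 < h ∧ 0 ≤ p.2 ∧ p.2 < w := by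
  unfold bOpen
  rw [mem_foldl_of_step _
    (fun a q => ∃ b ∈ PySem.List.pyRange 0 w 1,
      pyAt field a b ≠ -1 ∧ q ∈ bNeighbors a b ∧ 0 ≤ q.1 ∧ q.1 < h ∧ 0 ≤ q.2 ∧ q.2 < w)
    (fun s a q => mem_foldl_of_step _ _ (fun s x r => mem_bAddCell field h w s a x r) _ _ _)]
  simp [PySem.Set.empty]

-- neighbor relation is symmetric
theorem mem_bNeighbors_comm (i j a b : Int) :
    (a, b) ∈ bNeighbors i j ↔ (i, j) ∈ bNeighbors a b := by
  simp only [bNeighbors, List.mem_cons, List.not_mem_nil, or_false, Prod.mk.injEq]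
  omega

-- an unripe in-grid cell passes A's test iff it is in B's set
theorem openCell_iff_mem_bOpen (field : List (List Int)) (i j : Int)
    (hi : 0 ≤ i ∧ i < (field.length : Int)) (hj : 0 ≤ j ∧ j < pvW field) :
    OpenCell field (field.length : Int) (pvW field) i j ↔
      (i, j) ∈ bOpen field (field.length : Int) (pvW field) := by
  rw [mem_bOpen, OpenCell]
  constructor
  · rintro ⟨⟨a, b⟩, hp, ⟨h1, h2, h3, h4⟩, hv⟩
    refine ⟨a, ?_, b, ?_, hv, (mem_bNeighbors_comm i j a b).mp hp, hi.1, hi.2, hj.1, hj.2⟩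
    · rw [PySem.List.mem_pyRange_one]; exact ⟨h1, h2⟩
    · rw [PySem.List.mem_pyRange_one]; exact ⟨h3, h4⟩
  · rintro ⟨a, ha, b, hb, hv, hp, _⟩
    rw [PySem.List.mem_pyRange_one] at ha hb
    exact ⟨(a, b), (mem_bNeighbors_comm i j a b).mpr hp, ⟨ha.1, ha.2, hb.1, hb.2⟩, hv⟩

-- the two ports agree on EVERY input (both are totalised with the same defaulted accessor)
theorem ports_agree (field : List (List Int)) :
    checktomatoexception field = checktomatoexception_alt field := by
  unfold checktomatoexception checktomatoexception_alt
  split_ifs with hnil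
  · subst hnil; rfl
  · have hW : ((PySem.List.pyGetD field 0 ([] : List Int)).length : Int) = pvW field := rfl
    rw [hW]
    have key : (aRows field (PySem.List.pyRange 0 (field.length : Int) 1) = true) ↔
        (bRows field (bOpen field (field.length : Int) (pvW field)) (pvW field)
          (PySem.List.pyRange 0 (field.length : Int) 1) = true) := by
      rw [aRows_eq_true_iff, bRows_eq_true_iff]
      constructor
      · intro hA i hi
        rw [bRow_eq_true_iff]
        intro j hj hz
        have hbl := (aRow_eq_true_iff _ _ _).mp (hA i hi) j hj hz
        rw [aBlocked_eq_false_iff] at hbl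
        exact (PySem.Set.contains_iff _ _).mpr
          ((openCell_iff_mem_bOpen field i j
            ((PySem.List.mem_pyRange_one).mp hi) ((PySem.List.mem_pyRange_one).mp hj)).mp hbl)
      · intro hB i hi
        rw [aRow_eq_true_iff]
        intro j hj hz
        have hc := (bRow_eq_true_iff _ _ _ _).mp (hB i hi) j hj hz
        rw [aBlocked_eq_false_iff]
        exact (openCell_iff_mem_bOpen field i j
          ((PySem.List.mem_pyRange_one).mp hi) ((PySem.List.mem_pyRange_one).mp hj)).mpr
          ((PySem.Set.contains_iff _ _).mp hc)
    cases hA : aRows field (PySem.List.pyRange 0 (field.length : Int) 1) <;>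
      cases hB : bRows field (bOpen field (field.length : Int) (pvW field)) (pvW field)
        (PySem.List.pyRange 0 (field.length : Int) 1) <;> simp_all

-- ===== VERDICT (by name: the statement is the Claim_ definition above) =====
theorem checktomatoexception_spec : Claim_equal_checktomatoexception := by
  intro field _ _
  unfold Spec_checktomatoexception
  exact ports_agree field
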